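-- pv_equiv track=rewrite | github.com/ericbgarnick/AOC | 2015/day16/day16.py | match_part_2
-- ===== SOURCE A (Python) =====
-- from typing import Dict
--
-- PRESENT_ANALYSIS = {
--     "children": 3,
--     "cats": 7,
--     "samoyeds": 2,
--     "pomeranians": 3,
--     "akitas": 0,
--     "vizslas": 0,
--     "goldfish": 5,
--     "trees": 3,
--     "cars": 2,
--     "perfumes": 1,
-- }
--
-- def match_part_2(cur_sue: Dict[str, int]) -> int:
--     for name, val in cur_sue.items():
--         if name in {"cats", "trees"}:
--             if val <= PRESENT_ANALYSIS[name]: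
--                 return False
--         elif name in {"pomeranians", "goldfish"}:
--             if val >= PRESENT_ANALYSIS[name]:
--                 return False
--         elif val != PRESENT_ANALYSIS[name]:
--             return False
--     return True
-- ===== SOURCE B (Python) =====
-- PRESENT_ANALYSIS = {
--     "children": 3,
--     "cats": 7,
--     "samoyeds": 2,
--     "pomeranians": 3,
--     "akitas": 0,
--     "vizslas": 0,
--     "goldfish": 5,
--     "trees": 3,
--     "cars": 2,
--     "perfumes": 1,
-- }
--
-- GT = {"cats", "trees"}          # reading gives a lower bound
-- LT = {"pomeranians", "goldfish"}  # reading gives an upper bound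
--
--
-- def match_part_2(cur_sue):
--     # Three staged passes, one per rule class, instead of a single
--     # short-circuiting pass with a per-item branch.
--     items = list(cur_sue.items())
--     gt_ok = all(val > PRESENT_ANALYSIS[name] for name, val in items if name in GT)
--     lt_ok = all(val < PRESENT_ANALYSIS[name] for name, val in items if name in LT)
--     eq_ok = all(val == PRESENT_ANALYSIS[name]
--                 for name, val in items if name not in GT and name not in LT)
--     return gt_ok and lt_ok and eq_ok
-- ===== Notes on version B (the rewrite author's own statement) =====
-- stated objective: alternative
-- what changed: A's single short-circuiting pass with an if/elif branch per item is replaced by a partition into three rule classes (greater-than, less-than, equality) checked in three separate full passes over the items, whose results are conjoined at the end.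
-- outside the precondition, e.g. on match_part_2({'cats': 0, 'unknown': 1}): A returns False, B raises KeyError
import Mathlib
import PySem

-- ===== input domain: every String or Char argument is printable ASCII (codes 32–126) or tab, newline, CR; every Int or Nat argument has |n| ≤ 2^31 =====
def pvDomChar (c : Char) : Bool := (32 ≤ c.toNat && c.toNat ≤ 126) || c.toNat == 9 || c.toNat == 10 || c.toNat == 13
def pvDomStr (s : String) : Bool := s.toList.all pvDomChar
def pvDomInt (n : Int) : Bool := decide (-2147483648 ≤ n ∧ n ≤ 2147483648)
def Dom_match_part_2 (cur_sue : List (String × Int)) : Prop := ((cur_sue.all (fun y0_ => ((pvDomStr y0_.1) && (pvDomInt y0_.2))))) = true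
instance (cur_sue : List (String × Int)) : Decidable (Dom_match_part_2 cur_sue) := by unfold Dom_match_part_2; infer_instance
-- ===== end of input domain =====

-- B replaces A's single short-circuiting if/elif pass by three staged passes, one per rule class (>, <, =), conjoined at the end (alternative; same cost).

-- ===== PORT A =====
-- PRESENT_ANALYSIS, module constant shared by both programs
def pvPA : PySem.Dict String Int := PySem.Dict.ofList
  [("children", 3), ("cats", 7), ("samoyeds", 2), ("pomeranians", 3), ("akitas", 0),
   ("vizslas", 0), ("goldfish", 5), ("trees", 3), ("cars", 2), ("perfumes", 1)]

-- A's loop over cur_sue.items(); PRESENT_ANALYSIS[name] with a missing key raises KeyError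
-- (get? = none), excluded by Pre_match_part_2; getD 0 is never reached there.
def match_part_2 (cur_sue : List (String × Int)) : Bool :=
  match cur_sue with
  | [] => true
  | (name, val) :: rest =>
    if name = "cats" ∨ name = "trees" then
      if val ≤ (pvPA.get? name).getD 0 then false else match_part_2 rest
    else if name = "pomeranians" ∨ name = "goldfish" then
      if val ≥ (pvPA.get? name).getD 0 then false else match_part_2 rest
    else if val ≠ (pvPA.get? name).getD 0 then false
    else match_part_2 rest

-- ===== PORT B =====
-- B's rule-class sets GT and LT (Python set literals of string constants)
def pvGT : PySem.Set String := PySem.Set.ofList ["cats", "trees"]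
def pvLT : PySem.Set String := PySem.Set.ofList ["pomeranians", "goldfish"]

-- three staged passes (each 'all(...)' over the items filtered to its rule class), then conjoined
def match_part_2_alt (cur_sue : List (String × Int)) : Bool :=
  let gt_ok := (cur_sue.filter (fun p => pvGT.contains p.1)).all
      (fun p => p.2 > (pvPA.get? p.1).getD 0)
  let lt_ok := (cur_sue.filter (fun p => pvLT.contains p.1)).all
      (fun p => p.2 < (pvPA.get? p.1).getD 0)
  let eq_ok := (cur_sue.filter (fun p => !pvGT.contains p.1 && !pvLT.contains p.1)).all
      (fun p => p.2 == (pvPA.get? p.1).getD 0)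
  gt_ok && lt_ok && eq_ok

-- ===== PRECONDITION & SPEC =====
-- Pre_ excludes lists containing a property name outside PRESENT_ANALYSIS: there Python raises
-- KeyError (in A unless an earlier entry already failed, and likewise in B's eager passes).
def Pre_match_part_2 (cur_sue : List (String × Int)) : Prop :=
  ∀ p ∈ cur_sue, pvPA.contains p.1 = true
instance (cur_sue : List (String × Int)) : Decidable (Pre_match_part_2 cur_sue) := by unfold Pre_match_part_2; infer_instance

def pvWitness_match_part_2 : (List (String × Int)) := [("children", 3), ("cats", 9)]

def Spec_match_part_2 (cur_sue : List (String × Int)) (out : Bool) : Prop := out = match_part_2_alt cur_sue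
instance (cur_sue : List (String × Int)) (out : Bool) : Decidable (Spec_match_part_2 cur_sue out) := by unfold Spec_match_part_2; infer_instance

-- ===== CLAIM (what is proved, stated in full; the proofs are below) =====
def Claim_equal_match_part_2 : Prop := ∀ (cur_sue : List (String × Int)), Dom_match_part_2 cur_sue → Pre_match_part_2 cur_sue → Spec_match_part_2 cur_sue (match_part_2 cur_sue)

-- ===== LEMMAS AND PROOFS =====

-- a key contained in PRESENT_ANALYSIS is one of the ten literal names
set_option maxHeartbeats 1000000 in
lemma pvPA_contains_cases (s : String) (h : pvPA.contains s = true) :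
    s = "children" ∨ s = "cats" ∨ s = "samoyeds" ∨ s = "pomeranians" ∨ s = "akitas" ∨
    s = "vizslas" ∨ s = "goldfish" ∨ s = "trees" ∨ s = "cars" ∨ s = "perfumes" := by
  have e : pvPA.keys = ["children", "cats", "samoyeds", "pomeranians", "akitas",
    "vizslas", "goldfish", "trees", "cars", "perfumes"] := by rfl
  rw [PySem.Dict.contains_iff_mem_keys, e] at h
  simpa using h

theorem match_part_2_agrees : ∀ (cur_sue : List (String × Int)),
    Pre_match_part_2 cur_sue → match_part_2 cur_sue = match_part_2_alt cur_sue := by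
  intro cur_sue
  induction cur_sue with
  | nil => intro _; rfl
  | cons p rest ih =>
    intro hpre
    obtain ⟨name, val⟩ := p
    have hname := pvPA_contains_cases name (hpre _ (List.mem_cons_self))
    have hrest : match_part_2 rest = match_part_2_alt rest :=
      ih (fun q hq => hpre q (List.mem_cons_of_mem _ hq))
    rcases hname with h|h|h|h|h|h|h|h|h|h <;> subst h <;>
      simp only [match_part_2] <;>
      simp [match_part_2_alt, pvGT, pvLT, PySem.Set.mem_ofList, List.filter_cons,
            hrest, Int.not_le, Int.not_lt,
        show pvPA.get? "children" = some 3 from rfl, show pvPA.get? "cats" = some 7 from rfl,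
        show pvPA.get? "samoyeds" = some 2 from rfl, show pvPA.get? "pomeranians" = some 3 from rfl,
        show pvPA.get? "akitas" = some 0 from rfl, show pvPA.get? "vizslas" = some 0 from rfl,
        show pvPA.get? "goldfish" = some 5 from rfl, show pvPA.get? "trees" = some 3 from rfl,
        show pvPA.get? "cars" = some 2 from rfl, show pvPA.get? "perfumes" = some 1 from rfl] <;>
      (rw [Bool.eq_iff_iff] <;>
       simp only [Bool.and_eq_true, Bool.not_eq_true', decide_eq_true_eq,
         decide_eq_false_iff_not, beq_iff_eq, Int.not_le] <;> tauto)

-- ===== VERDICT (by name: the statement is the Claim_ definition above) =====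
theorem match_part_2_spec : Claim_equal_match_part_2 := by
  intro cur_sue _ hpre
  exact match_part_2_agrees cur_sue hpre
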